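-- pv_equiv track=rewrite | github.com/igotyabingo/codingtest | Python3/프로그래머스/2/389480. 완전범죄/완전범죄.py | solution
-- ===== SOURCE A (Python) =====
-- def solution(info, n, m):
--     # i번째 round에서 생성하는 temp 배열의 원소: i번째 물건을 훔쳤을 때 (A의 흔적 개수, B의 흔적 개수)
--
--     tmp = set([(0, 0)])
--     for i in range(len(info)):
--         # 물건 하나씩
--         temp = set()
--         if not tmp:
--             return -1
--
--         for t in tmp:
--             x, y = t
--             # 1. 이번 물건을 B가 훔치게 한다.
--             if y+info[i][1] < m:
--                 temp.add((x, y+info[i][1]))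
--
--             # 2. 이번 물건을 A가 훔치게 한다.
--             if x+info[i][0] < n:
--                 temp.add((x+info[i][0], y))
--
--         tmp = temp
--
--     return -1 if not tmp else min([i[0] for i in tmp])
-- ===== SOURCE B (Python) =====
-- def solution(info, n, m):
--     # dp maps an A-trace total x to the minimal B-trace total achievable with it;
--     # a state with a larger B-trace for the same A-trace is dominated and dropped.
--     dp = {0: 0}
--     for item in info:
--         a, b = item[0], item[1]
--         nxt = {}
--         for x, y in dp.items():
--             if y + b < m:
--                 w = nxt.get(x)
--                 if w is None or y + b < w:
--                     nxt[x] = y + b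
--             if x + a < n:
--                 w = nxt.get(x + a)
--                 if w is None or y < w:
--                     nxt[x + a] = y
--         dp = nxt
--     return -1 if not dp else min(dp)
-- ===== Notes on version B (the rewrite author's own statement) =====
-- stated objective: faster
-- what changed: Replaces A's breadth set of (A-trace,B-trace) pairs with a dict keeping only the minimal B-trace per A-trace (dominated states collapse), returning min key at the end.
-- outside the precondition, e.g. on solution([[5, 5], [1]], 1, 1): A returns -1, B raises IndexError
import Mathlib
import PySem

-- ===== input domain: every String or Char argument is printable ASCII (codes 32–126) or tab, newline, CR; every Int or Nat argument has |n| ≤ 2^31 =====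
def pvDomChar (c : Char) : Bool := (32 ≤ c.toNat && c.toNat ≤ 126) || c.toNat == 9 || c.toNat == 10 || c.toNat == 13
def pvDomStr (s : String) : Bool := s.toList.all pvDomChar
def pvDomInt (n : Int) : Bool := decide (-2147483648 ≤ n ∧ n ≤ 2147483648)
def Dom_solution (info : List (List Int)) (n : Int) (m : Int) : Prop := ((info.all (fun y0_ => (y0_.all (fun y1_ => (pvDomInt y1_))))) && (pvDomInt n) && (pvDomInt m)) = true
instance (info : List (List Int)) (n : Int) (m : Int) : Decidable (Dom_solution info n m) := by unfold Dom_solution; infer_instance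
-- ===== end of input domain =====

-- B replaces A's set of (A-trace, B-trace) pairs by a dict keeping, per A-trace, only the
-- minimal (dominant) B-trace; one honest line: fewer states per round, same exact result.

-- ===== PORT A =====
def pvAStep (row : List Int) (n : Int) (m : Int) (tmp : PySem.Set (Int × Int)) : PySem.Set (Int × Int) :=
  tmp.foldl (fun temp t =>
    let temp1 := if t.2 + PySem.List.pyGetD row 1 0 < m then PySem.Set.add temp (t.1, t.2 + PySem.List.pyGetD row 1 0) else temp
    if t.1 + PySem.List.pyGetD row 0 0 < n then PySem.Set.add temp1 (t.1 + PySem.List.pyGetD row 0 0, t.2) else temp1)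
    PySem.Set.empty

def solution (info : List (List Int)) (n : Int) (m : Int) : Int :=
  let res : Option (PySem.Set (Int × Int)) := info.foldl (fun acc row =>
      match acc with
      | none => none
      | some tmp => if tmp = [] then none else some (pvAStep row n m tmp))
    (some (PySem.Set.ofList [((0 : Int), (0 : Int))]))
  match res with
  | none => -1
  | some tmp => if tmp = [] then -1 else (PySem.List.min? (tmp.map (fun p => p.1)) (fun v => v)).getD (-1)

-- ===== PORT B =====
def pvRelax (d : PySem.Dict Int Int) (k : Int) (v : Int) : PySem.Dict Int Int :=
  match d.get? k with
  | none => d.insert k v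
  | some w => if v < w then d.insert k v else d

def pvBStep (row : List Int) (n : Int) (m : Int) (dp : PySem.Dict Int Int) : PySem.Dict Int Int :=
  dp.items.foldl (fun nxt p =>
    let nxt1 := if p.2 + PySem.List.pyGetD row 1 0 < m then pvRelax nxt p.1 (p.2 + PySem.List.pyGetD row 1 0) else nxt
    if p.1 + PySem.List.pyGetD row 0 0 < n then pvRelax nxt1 (p.1 + PySem.List.pyGetD row 0 0) p.2 else nxt1)
    PySem.Dict.empty

def solution_alt (info : List (List Int)) (n : Int) (m : Int) : Int :=
  let dp := info.foldl (fun dp row => pvBStep row n m dp) (PySem.Dict.empty.insert 0 0)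
  if dp.items = [] then -1 else (PySem.List.min? (PySem.Dict.keys dp) (fun v => v)).getD (-1)

-- ===== PRECONDITION & SPEC =====
-- Pre_ excludes inputs with a row of fewer than two entries: on those A raises IndexError,
-- except when the state set empties before the short row is reached (then A returns -1 while
-- B, which reads every row, still raises).
def Pre_solution (info : List (List Int)) (n : Int) (m : Int) : Prop :=
  ∀ row ∈ info, 2 ≤ row.length
instance (info : List (List Int)) (n : Int) (m : Int) : Decidable (Pre_solution info n m) := by unfold Pre_solution; infer_instance

def pvWitness_solution : List (List Int) × Int × Int := ([[1, 1], [2, 2]], 3, 3)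

def Spec_solution (info : List (List Int)) (n : Int) (m : Int) (out : Int) : Prop := out = solution_alt info n m
instance (info : List (List Int)) (n : Int) (m : Int) (out : Int) : Decidable (Spec_solution info n m out) := by unfold Spec_solution; infer_instance

-- ===== CLAIM (what is proved, stated in full; the proofs are below) =====
def Claim_equal_solution : Prop := ∀ (info : List (List Int)) (n : Int) (m : Int), Dom_solution info n m → Pre_solution info n m → Spec_solution info n m (solution info n m)

-- ===== LEMMAS AND PROOFS =====


def pvContrib (a b n m : Int) (p : Int × Int) (j : Int) : List Int :=
  (if p.2 + b < m ∧ j = p.1 then [p.2 + b] else []) ++ (if p.1 + a < n ∧ j = p.1 + a then [p.2] else [])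

def pvContribs (a b n m : Int) (l : List (Int × Int)) (j : Int) : List Int :=
  l.flatMap (fun p => pvContrib a b n m p j)

theorem pv_mem_step1 (a b n m : Int) (acc : PySem.Set (Int × Int)) (p : Int × Int) (j y : Int) :
    ((j, y) ∈ (if p.1 + a < n then PySem.Set.add (if p.2 + b < m then PySem.Set.add acc (p.1, p.2 + b) else acc) (p.1 + a, p.2) else (if p.2 + b < m then PySem.Set.add acc (p.1, p.2 + b) else acc))) ↔
      (j, y) ∈ acc ∨ y ∈ pvContrib a b n m p j := by
  simp only [pvContrib, List.mem_append]
  split_ifs <;>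
    simp_all [PySem.Set.mem_add, Prod.ext_iff] <;> tauto

theorem pv_mem_AStep_aux (a b n m : Int) (l : List (Int × Int)) (acc : PySem.Set (Int × Int)) (j y : Int) :
    (j, y) ∈ l.foldl (fun temp t =>
      let temp1 := if t.2 + b < m then PySem.Set.add temp (t.1, t.2 + b) else temp
      if t.1 + a < n then PySem.Set.add temp1 (t.1 + a, t.2) else temp1) acc ↔
      (j, y) ∈ acc ∨ y ∈ pvContribs a b n m l j := by
  induction l generalizing acc with
  | nil => simp [pvContribs]
  | cons p rest ih =>
    rw [List.foldl_cons, ih]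
    simp only [pvContribs, List.flatMap_cons, List.mem_append]
    rw [pv_mem_step1 a b n m acc p j y]
    tauto

def pvOmin (o : Option Int) (ys : List Int) : Option Int :=
  ys.foldl (fun o y => some (match o with | none => y | some w => min w y)) o

theorem pv_omin_some (w : Int) (ys : List Int) : pvOmin (some w) ys = some (ys.foldl min w) := by
  induction ys generalizing w with
  | nil => rfl
  | cons y t ih => simp [pvOmin] at ih ⊢; exact ih (min w y)

theorem pv_omin_append (o : Option Int) (ys zs : List Int) :
    pvOmin o (ys ++ zs) = pvOmin (pvOmin o ys) zs := by
  simp [pvOmin, List.foldl_append]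

theorem pv_relax_get? (d : PySem.Dict Int Int) (k v j : Int) :
    (pvRelax d k v).get? j =
      if j = k then some (match d.get? k with | none => v | some w => min w v) else d.get? j := by
  unfold pvRelax
  cases h : d.get? k with
  | none => simp [PySem.Dict.get?_insert, h]
  | some w =>
    by_cases hv : v < w
    · simp [hv, PySem.Dict.get?_insert, min_def]
      split_ifs <;> simp_all <;> omega
    · simp [hv, min_def]
      split_ifs <;> simp_all <;> omega

theorem pv_bstep1_get? (a b n m : Int) (acc : PySem.Dict Int Int) (p : Int × Int) (j : Int) :
    ((if p.1 + a < n then pvRelax (if p.2 + b < m then pvRelax acc p.1 (p.2 + b) else acc) (p.1 + a) p.2 else (if p.2 + b < m then pvRelax acc p.1 (p.2 + b) else acc)).get? j)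
      = pvOmin (acc.get? j) (pvContrib a b n m p j) := by
  simp only [pvContrib]
  by_cases h1 : p.2 + b < m <;> by_cases h2 : p.1 + a < n <;>
    by_cases hj1 : j = p.1 <;> by_cases hj2 : j = p.1 + a <;>
      simp [h1, h2, hj1, hj2, pv_relax_get?, pvOmin] <;>
    (try split_ifs with ha) <;> simp [ha] <;>
      (try subst ha) <;> cases hacc : acc.get? p.1 <;> simp [hacc, min_assoc]

theorem pv_BStep_get?_aux (a b n m : Int) (l : List (Int × Int)) (acc : PySem.Dict Int Int) (j : Int) :
    (l.foldl (fun nxt p =>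
      let nxt1 := if p.2 + b < m then pvRelax nxt p.1 (p.2 + b) else nxt
      if p.1 + a < n then pvRelax nxt1 (p.1 + a) p.2 else nxt1) acc).get? j
      = pvOmin (acc.get? j) (pvContribs a b n m l j) := by
  induction l generalizing acc with
  | nil => rfl
  | cons p rest ih =>
    rw [List.foldl_cons]
    show (rest.foldl _ (if p.1 + a < n then pvRelax (if p.2 + b < m then pvRelax acc p.1 (p.2 + b) else acc) (p.1 + a) p.2 else (if p.2 + b < m then pvRelax acc p.1 (p.2 + b) else acc))).get? j = _
    rw [ih, pv_bstep1_get?]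
    simp only [pvContribs, List.flatMap_cons, pv_omin_append]

theorem pv_relax_nodup (d : PySem.Dict Int Int) (k v : Int) (h : d.keys.Nodup) :
    (pvRelax d k v).keys.Nodup := by
  unfold pvRelax
  cases d.get? k with
  | none => exact PySem.Dict.nodup_keys_insert d k v h
  | some w =>
    by_cases hv : v < w
    · simpa [hv] using PySem.Dict.nodup_keys_insert d k v h
    · simpa [hv] using h

theorem pv_bstep_nodup_aux (a b n m : Int) (l : List (Int × Int)) (acc : PySem.Dict Int Int)
    (h : acc.keys.Nodup) :
    (l.foldl (fun nxt p =>
      let nxt1 := if p.2 + b < m then pvRelax nxt p.1 (p.2 + b) else nxt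
      if p.1 + a < n then pvRelax nxt1 (p.1 + a) p.2 else nxt1) acc).keys.Nodup := by
  induction l generalizing acc with
  | nil => exact h
  | cons p rest ih =>
    rw [List.foldl_cons]
    apply ih
    dsimp only
    split_ifs <;> (try apply pv_relax_nodup) <;> (try apply pv_relax_nodup) <;> exact h

theorem pv_omin_none_spec (ys : List Int) (v : Int) (h : pvOmin none ys = some v) :
    v ∈ ys ∧ ∀ y ∈ ys, v ≤ y := by
  cases ys with
  | nil => simp [pvOmin] at h
  | cons y t =>
    have : pvOmin none (y :: t) = pvOmin (some y) t := by simp [pvOmin]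
    rw [this, pv_omin_some] at h
    injection h with h
    subst h
    refine ⟨?_, ?_⟩
    · rcases PySem.List.foldl_min_mem t y with h | h
      · simp [h]
      · simp [h]
    · intro z hz
      rcases List.mem_cons.mp hz with rfl | hz
      · exact (PySem.List.foldl_min_le t z).1
      · exact (PySem.List.foldl_min_le t y).2 z hz

theorem pv_omin_none_eq_none (ys : List Int) (h : pvOmin none ys = none) : ys = [] := by
  cases ys with
  | nil => rfl
  | cons y t =>
    have : pvOmin none (y :: t) = pvOmin (some y) t := by simp [pvOmin]
    rw [this, pv_omin_some] at h
    cases h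

def pvInv (tmp : List (Int × Int)) (d : PySem.Dict Int Int) : Prop :=
  d.keys.Nodup ∧
  (∀ j y, (j, y) ∈ tmp → ∃ v, d.get? j = some v ∧ v ≤ y) ∧
  (∀ j v, d.get? j = some v → (j, v) ∈ tmp)

-- dominance: every contribution from tmp is dominated by one from d.items
theorem pv_dominate (a b n m : Int) (tmp : List (Int × Int)) (d : PySem.Dict Int Int)
    (h : pvInv tmp d) (j y : Int) (hy : y ∈ pvContribs a b n m tmp j) :
    ∃ y' ∈ pvContribs a b n m d.items j, y' ≤ y := by
  obtain ⟨hnd, h2, h3⟩ := h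
  obtain ⟨p, hp, hyy⟩ := List.mem_flatMap.mp hy
  obtain ⟨v, hv, hvle⟩ := h2 p.1 p.2 hp
  have hpm : (p.1, v) ∈ d.items := PySem.Dict.mem_items_of_get?_eq_some d hv
  simp only [pvContrib, List.mem_append] at hyy
  rcases hyy with hyy | hyy
  · by_cases hc : p.2 + b < m ∧ j = p.1
    · simp [hc] at hyy
      refine ⟨v + b, List.mem_flatMap.mpr ⟨(p.1, v), hpm, ?_⟩, by omega⟩
      simp [pvContrib]
      try (constructor <;> intros <;> omega)
    · simp [hc] at hyy
  · by_cases hc : p.1 + a < n ∧ j = p.1 + a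
    · simp [hc] at hyy
      refine ⟨v, List.mem_flatMap.mpr ⟨(p.1, v), hpm, ?_⟩, by omega⟩
      simp [pvContrib, hc.1, hc.2]
      try (intros; omega)
    · simp [hc] at hyy

theorem pv_items_sub (a b n m : Int) (tmp : List (Int × Int)) (d : PySem.Dict Int Int)
    (h : pvInv tmp d) (j y : Int) (hy : y ∈ pvContribs a b n m d.items j) :
    y ∈ pvContribs a b n m tmp j := by
  obtain ⟨hnd, h2, h3⟩ := h
  obtain ⟨⟨pk, pw⟩, hp, hyy⟩ := List.mem_flatMap.mp hy
  have : (pk, pw) ∈ tmp := h3 pk pw (PySem.Dict.get?_of_mem_items d hp hnd)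
  exact List.mem_flatMap.mpr ⟨(pk, pw), this, hyy⟩

theorem pv_inv_step' (a b n m : Int) (tmp : List (Int × Int)) (d : PySem.Dict Int Int)
    (h : pvInv tmp d) :
    pvInv
      (tmp.foldl (fun temp t =>
        let temp1 := if t.2 + b < m then PySem.Set.add temp (t.1, t.2 + b) else temp
        if t.1 + a < n then PySem.Set.add temp1 (t.1 + a, t.2) else temp1) PySem.Set.empty)
      (d.items.foldl (fun nxt p =>
        let nxt1 := if p.2 + b < m then pvRelax nxt p.1 (p.2 + b) else nxt
        if p.1 + a < n then pvRelax nxt1 (p.1 + a) p.2 else nxt1) PySem.Dict.empty) := by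
  refine ⟨pv_bstep_nodup_aux a b n m d.items PySem.Dict.empty (by simp [pysem]), ?_, ?_⟩
  · intro j y hmem
    rw [pv_mem_AStep_aux] at hmem
    simp [PySem.Set.empty] at hmem
    obtain ⟨y', hy', hle⟩ := pv_dominate a b n m tmp d h j y hmem
    have hne : pvContribs a b n m d.items j ≠ [] := fun hc => by simp [hc] at hy'
    have hg : (d.items.foldl (fun nxt p =>
        let nxt1 := if p.2 + b < m then pvRelax nxt p.1 (p.2 + b) else nxt
        if p.1 + a < n then pvRelax nxt1 (p.1 + a) p.2 else nxt1) PySem.Dict.empty).get? j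
        = pvOmin none (pvContribs a b n m d.items j) := by
      rw [pv_BStep_get?_aux]; simp [pysem]
    cases hv : pvOmin none (pvContribs a b n m d.items j) with
    | none => exact absurd (pv_omin_none_eq_none _ hv) hne
    | some v =>
      obtain ⟨hvm, hvmin⟩ := pv_omin_none_spec _ _ hv
      exact ⟨v, by rw [hg, hv], le_trans (hvmin y' hy') hle⟩
  · intro j v hv
    rw [pv_BStep_get?_aux] at hv
    simp [pysem] at hv
    obtain ⟨hvm, _⟩ := pv_omin_none_spec _ _ hv
    rw [pv_mem_AStep_aux]
    simp [PySem.Set.empty]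
    exact pv_items_sub a b n m tmp d h j v hvm

theorem pv_final' (tmp : List (Int × Int)) (d : PySem.Dict Int Int) (h : pvInv tmp d) :
    (if tmp = [] then (-1 : Int) else (PySem.List.min? (tmp.map (fun p => p.1)) (fun v => v)).getD (-1)) =
    (if d.items = [] then (-1 : Int) else (PySem.List.min? (PySem.Dict.keys d) (fun v => v)).getD (-1)) := by
  obtain ⟨hnd, h2, h3⟩ := h
  have hkeys : ∀ x : Int, x ∈ tmp.map (fun p => p.1) ↔ x ∈ PySem.Dict.keys d := by
    intro x
    constructor
    · intro hx
      obtain ⟨p, hp, hpx⟩ := List.mem_map.mp hx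
      obtain ⟨v, hv, _⟩ := h2 p.1 p.2 hp
      rw [← hpx]
      by_contra hnk
      rw [← PySem.Dict.get?_eq_none_iff_not_mem_keys] at hnk
      rw [hnk] at hv; cases hv
    · intro hx
      cases hg : d.get? x with
      | none => rw [PySem.Dict.get?_eq_none_iff_not_mem_keys] at hg; exact absurd hx hg
      | some v => exact List.mem_map.mpr ⟨(x, v), h3 x v hg, rfl⟩
  have hnil : tmp = [] ↔ d.items = [] := by
    constructor
    · intro ht
      have : PySem.Dict.keys d = [] := by
        rw [List.eq_nil_iff_forall_not_mem]
        intro x hx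
        have := (hkeys x).mpr hx
        simp [ht] at this
      simpa [PySem.Dict.keys, List.map_eq_nil_iff] using this
    · intro hd
      rw [List.eq_nil_iff_forall_not_mem]
      rintro ⟨j, y⟩ hp
      obtain ⟨v, hv, _⟩ := h2 j y hp
      have : j ∈ PySem.Dict.keys d := by
        by_contra hnk
        rw [← PySem.Dict.get?_eq_none_iff_not_mem_keys] at hnk
        rw [hnk] at hv; cases hv
      simp [PySem.Dict.keys, hd] at this
  by_cases ht : tmp = []
  · simp [ht, hnil.mp ht]
  · have hd : ¬ d.items = [] := fun hc => ht (hnil.mpr hc)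
    rw [if_neg ht, if_neg hd]
    have hkne : PySem.Dict.keys d ≠ [] := by
      intro hc; apply hd; simpa [PySem.Dict.keys, List.map_eq_nil_iff] using hc
    have htne : tmp.map (fun p : Int × Int => p.1) ≠ [] := by simp [ht]
    cases hm1 : PySem.List.min? (tmp.map (fun p => p.1)) (fun v => v) with
    | none => exact absurd ((PySem.List.min?_eq_none_iff _ _).mp hm1) htne
    | some s =>
      cases hm2 : PySem.List.min? (PySem.Dict.keys d) (fun v => v) with
      | none => exact absurd ((PySem.List.min?_eq_none_iff _ _).mp hm2) hkne
      | some k =>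
        simp only [Option.getD_some]
        have hs := PySem.List.min?_mem hm1
        have hk := PySem.List.min?_mem hm2
        have h1 := PySem.List.min?_isMin hm1 k ((hkeys k).mpr hk)
        have h2 := PySem.List.min?_isMin hm2 s ((hkeys s).mp hs)
        omega


theorem pv_inv_fold (info : List (List Int)) (n m : Int) (tmp : List (Int × Int)) (d : PySem.Dict Int Int)
    (h : pvInv tmp d) :
    pvInv (info.foldl (fun t row => pvAStep row n m t) tmp) (info.foldl (fun d row => pvBStep row n m d) d) := by
  induction info generalizing tmp d with
  | nil => exact h
  | cons row rest ih =>
    rw [List.foldl_cons, List.foldl_cons]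
    exact ih _ _ (pv_inv_step' (PySem.List.pyGetD row 0 0) (PySem.List.pyGetD row 1 0) n m tmp d h)

theorem pv_none_fold (info : List (List Int)) (n m : Int) :
    info.foldl (fun acc row => match acc with
      | none => none
      | some tmp => if tmp = [] then none else some (pvAStep row n m tmp)) (none : Option (PySem.Set (Int × Int))) = none := by
  induction info with
  | nil => rfl
  | cons row rest ih => exact ih

theorem pv_plain_nil (info : List (List Int)) (n m : Int) :
    info.foldl (fun t row => pvAStep row n m t) ([] : List (Int × Int)) = [] := by
  induction info with
  | nil => rfl
  | cons row rest ih => exact ih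

theorem pv_opt_loop (info : List (List Int)) (n m : Int) (tmp : PySem.Set (Int × Int)) :
    (info.foldl (fun acc row => match acc with
      | none => none
      | some t => if t = [] then none else some (pvAStep row n m t)) (some tmp)
        = some (info.foldl (fun t row => pvAStep row n m t) tmp))
    ∨ (info.foldl (fun acc row => match acc with
      | none => none
      | some t => if t = [] then none else some (pvAStep row n m t)) (some tmp) = none
        ∧ info.foldl (fun t row => pvAStep row n m t) tmp = []) := by
  induction info generalizing tmp with
  | nil => left; rfl
  | cons row rest ih =>
    rw [List.foldl_cons, List.foldl_cons]
    by_cases htmp : tmp = []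
    · right
      subst htmp
      constructor
      · simpa using pv_none_fold rest n m
      · have : pvAStep row n m [] = [] := rfl
        rw [this]
        exact pv_plain_nil rest n m
    · have : (match some tmp with
        | none => none
        | some t => if t = [] then none else some (pvAStep row n m t)) = some (pvAStep row n m tmp) := by
        simp [htmp]
      rw [this]
      exact ih (pvAStep row n m tmp)

theorem pv_base : pvInv [((0 : Int), (0 : Int))] (PySem.Dict.empty.insert 0 0) := by
  refine ⟨by decide, ?_, ?_⟩
  · intro j y hm
    simp at hm
    obtain ⟨rfl, rfl⟩ := hm
    exact ⟨0, by decide, le_refl 0⟩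
  · intro j v hv
    rw [PySem.Dict.get?_insert] at hv
    split_ifs at hv with hj
    · subst hj
      injection hv with hv
      simp [← hv]
    · simp [pysem] at hv

-- ===== VERDICT (by name: the statement is the Claim_ definition above) =====
theorem solution_spec : Claim_equal_solution := by
  intro info n m _ _
  unfold Spec_solution
  have hinv : pvInv (info.foldl (fun t row => pvAStep row n m t) [((0 : Int), (0 : Int))])
      (info.foldl (fun d row => pvBStep row n m d) (PySem.Dict.empty.insert 0 0)) :=
    pv_inv_fold info n m _ _ pv_base
  have hfin := pv_final' _ _ hinv
  have hA : solution info n m =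
      (if (info.foldl (fun t row => pvAStep row n m t) [((0 : Int), (0 : Int))]) = [] then (-1 : Int)
       else (PySem.List.min? ((info.foldl (fun t row => pvAStep row n m t) [((0 : Int), (0 : Int))]).map (fun p => p.1)) (fun v => v)).getD (-1)) := by
    unfold solution
    simp only [show PySem.Set.ofList [((0 : Int), (0 : Int))] = [((0 : Int), (0 : Int))] from rfl]
    rcases pv_opt_loop info n m [((0 : Int), (0 : Int))] with h | ⟨h1, h2⟩
    · simp only [h]
    · simp only [h1, h2]
      simp
  rw [hA]
  exact hfin
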